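-- pv_equiv track=rewrite | github.com/aghiuru/delayed-streams-modeling | subtitle_app/transcription_engine.py | break_into_lines
-- ===== SOURCE A (Python) =====
-- from typing import List, Callable, Optional
--
-- def break_into_lines(text: str, max_lines: int, words_per_line: int) -> List[str]:
--     """Break text into multiple lines based on word count."""
--     if not text:
--         return []
--
--     words = text.strip().split()
--     if not words:
--         return []
--
--     if len(words) <= words_per_line:
--         return [text]
--
--     lines = []
--     current_line_words = []
--
--     for i, word in enumerate(words):
--         current_line_words.append(word)
--
--         if len(current_line_words) >= words_per_line:
--             lines.append(" ".join(current_line_words))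
--             current_line_words = []
--
--             if len(lines) >= max_lines:
--                 remaining_words = words[i + 1 :]
--                 if remaining_words:
--                     lines[-1] = lines[-1] + " " + " ".join(remaining_words)
--                 return lines
--
--     if current_line_words:
--         lines.append(" ".join(current_line_words))
--
--     return lines
-- ===== SOURCE B (Python) =====
-- from typing import List
--
--
-- def break_into_lines(text: str, max_lines: int, words_per_line: int) -> List[str]:
--     """Break text into multiple lines based on word count (slice-driven)."""
--     if not text:
--         return []
--
--     words = text.strip().split()
--     if not words:
--         return []
--
--     n = len(words)
--     if n <= words_per_line:
--         return [text]
--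
--     num_lines = max(1, min((n + words_per_line - 1) // words_per_line, max_lines))
--     lines = [
--         " ".join(words[i * words_per_line : (i + 1) * words_per_line])
--         for i in range(num_lines - 1)
--     ]
--     lines.append(" ".join(words[(num_lines - 1) * words_per_line :]))
--     return lines
-- ===== Notes on version B (the rewrite author's own statement) =====
-- stated objective: simpler
-- what changed: Replaces the stateful word-by-word accumulation with early-return cap-and-merge by computing the number of lines up front (capped ceiling division) and building each line by index slicing, the last slice absorbing any remainder.
-- outside the precondition, e.g. on break_into_lines('a b', 2, 0): A returns ['a', 'b'], B raises ZeroDivisionError; on break_into_lines('a b c', 2, -1): A returns ['a', 'b c'], B returns ['a b c']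
import Mathlib
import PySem

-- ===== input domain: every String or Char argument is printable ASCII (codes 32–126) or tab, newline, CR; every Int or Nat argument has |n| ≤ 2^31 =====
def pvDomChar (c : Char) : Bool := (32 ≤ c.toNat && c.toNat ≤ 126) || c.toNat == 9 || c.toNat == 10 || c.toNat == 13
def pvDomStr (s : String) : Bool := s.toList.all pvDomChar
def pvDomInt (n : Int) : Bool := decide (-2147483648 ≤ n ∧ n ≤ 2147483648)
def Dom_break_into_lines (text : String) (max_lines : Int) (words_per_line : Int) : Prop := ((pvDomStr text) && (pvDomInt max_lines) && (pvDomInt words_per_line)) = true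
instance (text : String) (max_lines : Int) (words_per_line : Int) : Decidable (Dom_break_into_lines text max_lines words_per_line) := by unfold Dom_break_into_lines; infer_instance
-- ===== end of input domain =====

-- B replaces A's stateful word-accumulation loop (with its early-return cap-and-merge)
-- by computing the capped number of lines up front and slicing the words by index: simpler decomposition, same cost.


-- ===== PORT A =====
def pvJoin (xs : List String) : String := PySem.Str.join " " xs

-- the for-loop of A: state = (remaining words, current_line_words, lines); early return on the max_lines cap
def pvLoopA (max_lines words_per_line : Int) : List String → List String → List String → List String
  | [], cur, lines => if cur ≠ [] then lines ++ [pvJoin cur] else lines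
  | w :: rest, cur, lines =>
      let cur' := cur ++ [w]
      if (cur'.length : Int) ≥ words_per_line then
        let lines' := lines ++ [pvJoin cur']
        if (lines'.length : Int) ≥ max_lines then
          -- lines[-1] = lines[-1] + " " + " ".join(remaining_words); return lines
          if rest ≠ [] then lines'.dropLast ++ [lines'.getLast! ++ " " ++ pvJoin rest] else lines'
        else pvLoopA max_lines words_per_line rest [] lines'
      else pvLoopA max_lines words_per_line rest cur' lines

def break_into_lines (text : String) (max_lines : Int) (words_per_line : Int) : List String :=
  if text = "" then []
  else
    let words := PySem.Str.split₀ (PySem.Str.strip text)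
    if words = [] then []
    else if (words.length : Int) ≤ words_per_line then [text]
    else pvLoopA max_lines words_per_line words [] []

-- ===== PORT B =====
def break_into_lines_alt (text : String) (max_lines : Int) (words_per_line : Int) : List String :=
  if text = "" then []
  else
    let words := PySem.Str.split₀ (PySem.Str.strip text)
    if words = [] then []
    else
      let n : Int := words.length
      if n ≤ words_per_line then [text]
      else
        let numLines : Int := max 1 (min (PySem.Int.floordiv (n + words_per_line - 1) words_per_line) max_lines)
        ((PySem.List.pyRange 0 (numLines - 1) 1).map (fun i =>
            pvJoin (PySem.List.slice words (some (i * words_per_line)) (some ((i + 1) * words_per_line))))) ++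
          [pvJoin (PySem.List.slice words (some ((numLines - 1) * words_per_line)) none)]

-- ===== PRECONDITION & SPEC =====
-- Pre_ restricts to the natural domain words_per_line ≥ 1: for words_per_line = 0 B's ceiling division raises
-- ZeroDivisionError, and a negative words_per_line is a meaningless parameter on which A's one-word-per-line
-- output is an accident of its `>=` length check.
def Pre_break_into_lines (text : String) (max_lines : Int) (words_per_line : Int) : Prop := 1 ≤ words_per_line
instance (text : String) (max_lines : Int) (words_per_line : Int) : Decidable (Pre_break_into_lines text max_lines words_per_line) := by unfold Pre_break_into_lines; infer_instance
def pvWitness_break_into_lines : String × Int × Int := ("one two three four five", 2, 2)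

def Spec_break_into_lines (text : String) (max_lines : Int) (words_per_line : Int) (out : List String) : Prop := out = break_into_lines_alt text max_lines words_per_line
instance (text : String) (max_lines : Int) (words_per_line : Int) (out : List String) : Decidable (Spec_break_into_lines text max_lines words_per_line out) := by unfold Spec_break_into_lines; infer_instance

-- ===== CLAIM (what is proved, stated in full; the proofs are below) =====
def Claim_equal_break_into_lines : Prop := ∀ (text : String) (max_lines : Int) (words_per_line : Int), Dom_break_into_lines text max_lines words_per_line → Pre_break_into_lines text max_lines words_per_line → Spec_break_into_lines text max_lines words_per_line (break_into_lines text max_lines words_per_line)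

-- ===== LEMMAS AND PROOFS =====

-- " ".join distributes over ++ of nonempty lists (List Char level, then String level)
theorem pvCharsJoin_append (sep : List Char) (l1 l2 : List (List Char)) (h1 : l1 ≠ []) (h2 : l2 ≠ []) :
    PySem.Chars.join sep (l1 ++ l2) = PySem.Chars.join sep l1 ++ sep ++ PySem.Chars.join sep l2 := by
  induction l1 with
  | nil => exact absurd rfl h1
  | cons a t ih =>
    cases t with
    | nil =>
      cases l2 with
      | nil => exact absurd rfl h2
      | cons b r =>
        simp only [List.singleton_append, PySem.Chars.join_cons_cons, PySem.Chars.join_singleton]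
    | cons c t' =>
      have hrec := ih (by simp) 
      calc PySem.Chars.join sep ((a :: c :: t') ++ l2)
          = a ++ sep ++ PySem.Chars.join sep ((c :: t') ++ l2) := by
            cases t' <;> simp [PySem.Chars.join_cons_cons]
        _ = a ++ sep ++ (PySem.Chars.join sep (c :: t') ++ sep ++ PySem.Chars.join sep l2) := by rw [hrec]
        _ = (a ++ sep ++ PySem.Chars.join sep (c :: t')) ++ sep ++ PySem.Chars.join sep l2 := by
            simp [List.append_assoc]
        _ = PySem.Chars.join sep (a :: c :: t') ++ sep ++ PySem.Chars.join sep l2 := by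
            rw [PySem.Chars.join_cons_cons]

theorem pvJoin_append (xs ys : List String) (hx : xs ≠ []) (hy : ys ≠ []) :
    pvJoin (xs ++ ys) = pvJoin xs ++ " " ++ pvJoin ys := by
  unfold pvJoin PySem.Str.join
  rw [List.map_append, pvCharsJoin_append _ _ _ (by simpa using hx) (by simpa using hy)]
  rw [← String.ofList_append, ← String.ofList_append]
  rfl

-- the slice-built result: k full lines of w words, then one line with everything left
def pvBuild (w : Nat) : Nat → List String → List String
  | 0, ws => [pvJoin ws]
  | k + 1, ws => pvJoin (ws.take w) :: pvBuild w k (ws.drop w)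

-- number of full lines before the last one, as computed by B
def pvK (w n : Nat) (m : Int) : Nat := (max 1 (min (((n + w - 1) / w : Nat) : Int) m)).toNat - 1

-- one round of A's loop: fill the current line up to w words, then cap-check
theorem pvLoopA_fill (ml : Int) (w : Nat) :
    ∀ (ws cur lines : List String), cur.length < w → ws ≠ [] →
    pvLoopA ml (w : Int) ws cur lines =
      if cur.length + ws.length ≤ w then lines ++ [pvJoin (cur ++ ws)]
      else if ((lines.length : Int) + 1 ≥ ml) then lines ++ [pvJoin (cur ++ ws)]
      else pvLoopA ml (w : Int) ((cur ++ ws).drop w) [] (lines ++ [pvJoin ((cur ++ ws).take w)]) := by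
  intro ws
  induction ws with
  | nil => intro cur lines _ hne; exact absurd rfl hne
  | cons a rest ih =>
    intro cur lines hcur _
    by_cases hc : cur.length + 1 = w
    · -- the current word completes a line
      have hfull : ((cur ++ [a]).length : Int) ≥ (w : Int) := by simp; omega
      have hlena : (cur ++ [a]).length = w := by simp; omega
      have htake : ((cur ++ [a]) ++ rest).take w = cur ++ [a] := List.take_left' hlena
      have hdrop : ((cur ++ [a]) ++ rest).drop w = rest := List.drop_left' hlena
      have hsplit : cur ++ a :: rest = (cur ++ [a]) ++ rest := by simp
      cases rest with
      | nil =>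
        simp only [pvLoopA, if_pos hfull]
        have hle : cur.length + ([a] : List String).length ≤ w := by simp; omega
        rw [if_pos hle]
        split
        · simp
        · rfl
      | cons b r =>
        simp only [pvLoopA, if_pos hfull]
        have hgt : ¬ (cur.length + (a :: b :: r).length ≤ w) := by simp; omega
        rw [if_neg hgt]
        have hlen : (((lines ++ [pvJoin (cur ++ [a])]).length : Int) ≥ ml) ↔ ((lines.length : Int) + 1 ≥ ml) := by
          simp
        by_cases hcap : ((lines.length : Int) + 1 ≥ ml)
        · rw [if_pos (hlen.mpr hcap), if_pos hcap]
          have hbr : (b :: r : List String) ≠ [] := by simp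
          rw [if_pos hbr]
          have hjoin : pvJoin ((cur ++ [a]) ++ (b :: r)) = pvJoin (cur ++ [a]) ++ " " ++ pvJoin (b :: r) :=
            pvJoin_append _ _ (by simp) (by simp)
          rw [hsplit, hjoin]
          simp
        · rw [if_neg (fun h => hcap (hlen.mp h)), if_neg hcap, hsplit, htake, hdrop]
          simp only [pvLoopA]
    · -- the line is still short: the word is appended and the loop continues
      have hshort : ¬ (((cur ++ [a]).length : Int) ≥ (w : Int)) := by simp; omega
      simp only [pvLoopA, if_neg hshort]
      cases rest with
      | nil =>
        simp only [pvLoopA]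
        have hle : cur.length + ([a] : List String).length ≤ w := by simp; omega
        rw [if_pos hle, if_pos (by simp)]
      | cons b r =>
        rw [ih (cur ++ [a]) lines (by simp; omega) (by simp)]
        have h1 : (cur ++ [a]).length + (b :: r : List String).length = cur.length + (a :: b :: r : List String).length := by
          simp; omega
        have h2 : (cur ++ [a]) ++ (b :: r) = cur ++ a :: b :: r := by simp
        rw [h1, h2]

-- A's loop from a fresh line equals the slice-built result with B's capped line count
theorem pvLoopA_eq_build (ml : Int) (w : Nat) (hw1 : 1 ≤ w) :
    ∀ (n : Nat) (ws lines : List String), ws.length = n → ws ≠ [] →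
    pvLoopA ml (w : Int) ws [] lines = lines ++ pvBuild w (pvK w ws.length (ml - lines.length)) ws := by
  intro n
  induction n using Nat.strong_induction_on with
  | _ n ih =>
    intro ws lines hlen hne
    have hn1 : 1 ≤ ws.length := List.length_pos_of_ne_nil hne
    rw [pvLoopA_fill ml w ws [] lines (by simp only [List.length_nil]; omega) hne]
    simp only [List.nil_append, List.length_nil, Nat.zero_add]
    by_cases hle : ws.length ≤ w
    · rw [if_pos hle]
      have hc : (ws.length + w - 1) / w = 1 := by
        have h : ws.length + w - 1 = (ws.length - 1) + w := by omega
        rw [h, Nat.add_div_right _ (by omega), Nat.div_eq_of_lt (by omega)]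
      have hk : pvK w ws.length (ml - lines.length) = 0 := by unfold pvK; rw [hc]; omega
      rw [hk]; rfl
    · rw [if_neg hle]
      have hcsucc : (ws.length + w - 1) / w = ((ws.length - w) + w - 1) / w + 1 := by
        have h : ws.length + w - 1 = (((ws.length - w) + w - 1)) + w := by omega
        rw [h, Nat.add_div_right _ (by omega)]
      have hc1 : 1 ≤ ((ws.length - w) + w - 1) / w := by
        rw [Nat.le_div_iff_mul_le (by omega)]; omega
      by_cases hcap : ((lines.length : Int) + 1 ≥ ml)
      · rw [if_pos hcap]
        have hk : pvK w ws.length (ml - lines.length) = 0 := by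
          unfold pvK; rw [hcsucc]; omega
        rw [hk]; rfl
      · rw [if_neg hcap]
        have hrec := ih (ws.length - w) (by omega) (ws.drop w) (lines ++ [pvJoin (ws.take w)])
          (by simp) (by intro h; have := congrArg List.length h; simp at this; omega)
        rw [hrec]
        have hk : pvK w ws.length (ml - lines.length) =
            pvK w (ws.drop w).length (ml - ((lines ++ [pvJoin (ws.take w)]).length)) + 1 := by
          generalize hcg : ((ws.length - w) + w - 1) / w = c' at hcsucc hc1
          unfold pvK
          rw [List.length_drop, hcsucc, hcg]
          simp only [List.length_append, List.length_cons, List.length_nil]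
          omega
        rw [hk]
        simp [pvBuild, List.append_assoc]

-- B's comprehension of slices is the slice-built result
theorem pvChunks (w : Nat) : ∀ (k : Nat) (ws : List String),
    ((List.range k).map (fun i => pvJoin ((ws.drop (i * w)).take w))) ++ [pvJoin (ws.drop (k * w))]
      = pvBuild w k ws := by
  intro k
  induction k with
  | zero => intro ws; simp [pvBuild]
  | succ k ih =>
    intro ws
    rw [List.range_succ_eq_map]
    simp only [List.map_cons, List.map_map, List.cons_append, pvBuild]
    congr 1
    · simp
    · have hdd : ∀ i : Nat, ws.drop (Nat.succ i * w) = (ws.drop w).drop (i * w) := by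
        intro i
        rw [List.drop_drop]
        congr 1
        rw [Nat.succ_mul]
        exact Nat.add_comm _ _
      simp only [Function.comp_def, hdd]
      exact ih (ws.drop w)

-- ===== VERDICT (by name: the statement is the Claim_ definition above) =====
theorem break_into_lines_spec : Claim_equal_break_into_lines := by
  intro text ml wpl _ hpre
  unfold Spec_break_into_lines break_into_lines break_into_lines_alt
  by_cases ht : text = ""
  · simp [ht]
  · rw [if_neg ht, if_neg ht]
    set words := PySem.Str.split₀ (PySem.Str.strip text) with hwords
    by_cases hwd : words = []
    · simp [hwd]
    · rw [if_neg hwd, if_neg hwd]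
      by_cases hle : ((words.length : Int) ≤ wpl)
      · rw [if_pos hle, if_pos hle]
      · rw [if_neg hle, if_neg hle]
        have hpre' : (1 : Int) ≤ wpl := hpre
        set w : Nat := wpl.toNat with hwdef
        have hw : wpl = (w : Int) := by omega
        have hw1 : 1 ≤ w := by omega
        have hn1 : 1 ≤ words.length := List.length_pos_of_ne_nil hwd
        have hnw : w < words.length := by
          rw [hw] at hle; omega
        -- A side
        rw [hw, pvLoopA_eq_build ml w hw1 words.length words [] rfl hwd]
        simp only [List.length_nil, Nat.cast_zero, sub_zero, List.nil_append]
        -- B side: the line count is pvK + 1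
        have hfd : PySem.Int.floordiv ((words.length : Int) + (w : Int) - 1) (w : Int)
            = (((words.length + w - 1) / w : Nat) : Int) := by
          rw [show ((words.length : Int) + (w : Int) - 1) = (((words.length + w - 1 : Nat)) : Int) by omega]
          exact PySem.Int.floordiv_natCast _ _
        have hK : max 1 (min (PySem.Int.floordiv ((words.length : Int) + (w : Int) - 1) (w : Int)) ml) - 1
            = ((pvK w words.length ml : Nat) : Int) := by
          rw [hfd]
          unfold pvK
          generalize ((words.length + w - 1) / w : Nat) = c
          omega
        rw [hK]
        rw [PySem.List.pyRange_zero_natCast]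
        have hslice2 : PySem.List.slice words (some (((pvK w words.length ml : Nat) : Int) * (w : Int))) none
            = words.drop (pvK w words.length ml * w) := by
          rw [show (((pvK w words.length ml : Nat) : Int) * (w : Int)) = (((pvK w words.length ml * w : Nat)) : Int) by push_cast; ring]
          exact PySem.List.slice_from_natCast _ _
        rw [hslice2, List.map_map, ← pvChunks w (pvK w words.length ml) words]
        congr 1
        apply List.map_congr_left
        intro i _
        simp only [Function.comp]
        rw [show ((i : Int) * (w : Int)) = (((i * w : Nat)) : Int) by push_cast; ring,
            show ((i : Int) + 1) * (w : Int) = (((i * w : Nat)) : Int) + ((w : Nat) : Int) by push_cast; ring]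
        rw [PySem.List.slice_natCast_add]
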